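-- pv_equiv track=rewrite | github.com/pypi-data/pypi-mirror-381 | packages/amherst/amherst-0.4.2.tar.gz/amherst-0.4.2/src/amherst/models/commence_adaptors.py | split_addr_str2
-- ===== SOURCE A (Python) =====
-- def split_addr_str2(address: str) -> tuple[list[str], str]:
--     addr_lines = address.splitlines()
--     town = addr_lines.pop() if len(addr_lines) > 1 else ''
--
--     if len(addr_lines) < 3:
--         addr_lines.extend([''] * (3 - len(addr_lines)))
--     elif len(addr_lines) > 3:
--         addr_lines[2] = ','.join(addr_lines[2:])
--         addr_lines = addr_lines[:3]
--
--     used_lines = [_ for _ in addr_lines if _]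
--     return used_lines, town
-- ===== SOURCE B (Python) =====
-- def _collect(ls, slots):
--     """Recursive single pass: the first `slots` positions are kept individually
--     (dropping empties), everything after them is comma-joined into one line."""
--     if not ls:
--         return []
--     if slots == 0:
--         joined = ','.join(ls)
--         return [joined] if joined else []
--     head, rest = ls[0], ls[1:]
--     return ([head] if head else []) + _collect(rest, slots - 1)
--
--
-- def split_addr_str2(address: str) -> tuple[list[str], str]:
--     lines = address.splitlines()
--     if len(lines) < 2:
--         return _collect(lines, 2), ''
--     return _collect(lines[:-1], 2), lines[-1]
-- ===== Notes on version B (the rewrite author's own statement) =====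
-- stated objective: alternative
-- what changed: Replaces A's staged list surgery (pad with empties, in-place join-assignment, truncate, then filter) by one structural recursion over the body lines with a remaining-head-slots counter that keeps the first two positions individually and comma-joins the tail when the slots run out.
import Mathlib
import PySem

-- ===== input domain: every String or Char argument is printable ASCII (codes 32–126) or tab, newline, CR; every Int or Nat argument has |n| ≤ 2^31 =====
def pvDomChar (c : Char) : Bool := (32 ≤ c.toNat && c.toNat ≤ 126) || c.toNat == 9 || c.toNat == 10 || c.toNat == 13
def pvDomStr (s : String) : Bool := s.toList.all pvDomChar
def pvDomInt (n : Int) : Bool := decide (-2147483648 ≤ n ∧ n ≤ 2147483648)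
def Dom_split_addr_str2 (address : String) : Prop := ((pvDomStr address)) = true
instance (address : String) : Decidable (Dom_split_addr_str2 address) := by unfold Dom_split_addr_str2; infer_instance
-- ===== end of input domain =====

-- B replaces A's staged list surgery (pad, in-place join-assignment, truncate, filter) by one
-- structural recursion over the body lines with a remaining-head-slots counter (objective: alternative).

-- ===== PORT A =====
def split_addr_str2 (address : String) : List String × String :=
  let addr_lines0 := PySem.Str.splitlines address
  let p := if addr_lines0.length > 1 then
             match PySem.List.pop? addr_lines0 (-1) with
             | some (v, rest) => (v, rest)
             | none => ("", addr_lines0)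
           else ("", addr_lines0)
  let town := p.1
  let addr_lines1 := p.2
  let addr_lines2 :=
    if addr_lines1.length < 3 then
      addr_lines1 ++ List.replicate (3 - addr_lines1.length) ""
    else if addr_lines1.length > 3 then
      PySem.List.slice (addr_lines1.set 2 (PySem.Str.join "," (PySem.List.slice addr_lines1 (some 2) none))) none (some 3)
    else addr_lines1
  (addr_lines2.filter (fun s => s ≠ ""), town)

-- ===== PORT B =====
-- recursive single pass: first `slots` positions kept individually (dropping empties),
-- everything after them comma-joined into one line
def pvCollect : List String → Nat → List String
  | [], _ => []
  | l :: ls, 0 =>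
      let joined := PySem.Str.join "," (l :: ls)
      if joined ≠ "" then [joined] else []
  | l :: ls, slots + 1 =>
      (if l ≠ "" then [l] else []) ++ pvCollect ls slots

def split_addr_str2_alt (address : String) : List String × String :=
  let lines := PySem.Str.splitlines address
  if lines.length < 2 then (pvCollect lines 2, "")
  else (pvCollect (PySem.List.slice lines none (some (-1))) 2,
        match PySem.List.pyGet? lines (-1) with | some t => t | none => "")

-- ===== PRECONDITION & SPEC =====
def Spec_split_addr_str2 (address : String) (out : List String × String) : Prop := out = split_addr_str2_alt address
instance (address : String) (out : List String × String) : Decidable (Spec_split_addr_str2 address out) := by unfold Spec_split_addr_str2; infer_instance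

-- ===== CLAIM =====
def Claim_equal_split_addr_str2 : Prop := ∀ (address : String), Dom_split_addr_str2 address → Spec_split_addr_str2 address (split_addr_str2 address)

-- ===== LEMMAS AND PROOFS =====
theorem split_addr_str2_eq_alt (a : String) : split_addr_str2 a = split_addr_str2_alt a := by
  unfold split_addr_str2 split_addr_str2_alt
  generalize PySem.Str.splitlines a = L
  induction L using List.reverseRecOn with
  | nil => decide
  | append_singleton M t ih =>
    clear ih
    simp only [PySem.List.pop?_last, PySem.List.slice_to_neg_one, List.dropLast_concat,
      PySem.List.pyGet?_neg_one_append_singleton]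
    rcases M with _ | ⟨x, _ | ⟨y, _ | ⟨z, _ | ⟨w, rest⟩⟩⟩⟩
    · by_cases h : t = "" <;> simp [List.filter, pvCollect, h]
    · simp [List.filter, pvCollect]; split_ifs <;> simp_all
    · simp [List.filter, pvCollect]; split_ifs <;> simp_all
    · simp [List.filter, pvCollect, PySem.Str.join]; split_ifs <;> simp_all
    · simp [PySem.List.slice, List.set, pvCollect]
      rw [if_neg (by omega)]
      simp [List.filter]; split_ifs <;> simp_all

-- ===== VERDICT =====
theorem split_addr_str2_spec : Claim_equal_split_addr_str2 := by
  intro a _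
  unfold Spec_split_addr_str2
  exact split_addr_str2_eq_alt a
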